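-- pv_equiv track=rewrite | github.com/damizhou/TrafficIngestor | small_tools/code/pad_url_list_to_target.py | build_padded_rows
-- ===== SOURCE A (Python) =====
-- from typing import Dict, List, Optional, Tuple
--
-- def build_padded_rows(rows: List[Dict[str, str]], target_count: int) -> List[Dict[str, str]]:
--     if len(rows) >= target_count:
--         return list(rows)
--
--     padded: List[Dict[str, str]] = []
--     idx = 0
--     source_size = len(rows)
--     while len(padded) < target_count:
--         padded.append(dict(rows[idx % source_size]))
--         idx += 1
--     return padded
-- ===== SOURCE B (Python) =====
-- def build_padded_rows(rows, target_count):
--     if len(rows) >= target_count: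
--         return list(rows)
--     q, r = divmod(target_count, len(rows))
--     padded = [dict(row) for _ in range(q) for row in rows]
--     padded.extend(dict(rows[i]) for i in range(r))
--     return padded
-- ===== Notes on version B (the rewrite author's own statement) =====
-- stated objective: alternative
-- what changed: Replaces the one-at-a-time modular-index while loop by block construction: divmod gives q full copies of the row list plus a prefix of r rows, appended wholesale.
import Mathlib
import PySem

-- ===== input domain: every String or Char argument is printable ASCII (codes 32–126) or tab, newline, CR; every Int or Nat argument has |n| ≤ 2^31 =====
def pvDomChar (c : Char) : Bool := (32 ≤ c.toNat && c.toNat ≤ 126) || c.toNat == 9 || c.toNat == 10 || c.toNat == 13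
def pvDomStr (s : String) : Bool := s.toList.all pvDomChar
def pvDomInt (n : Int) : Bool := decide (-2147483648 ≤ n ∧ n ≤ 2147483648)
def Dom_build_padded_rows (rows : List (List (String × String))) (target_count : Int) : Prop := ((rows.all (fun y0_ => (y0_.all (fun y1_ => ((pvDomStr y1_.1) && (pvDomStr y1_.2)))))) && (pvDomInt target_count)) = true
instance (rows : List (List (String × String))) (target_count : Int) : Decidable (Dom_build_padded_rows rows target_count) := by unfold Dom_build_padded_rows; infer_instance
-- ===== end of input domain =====

-- B builds the padding block-wise from divmod instead of A's one-element-at-a-time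
-- modular-index while loop; same return value on Pre_ (objective: alternative decomposition).

-- ===== PORT A =====
-- the while loop: appends rows[idx % len(rows)] until padded reaches target_count.
-- rows.getD is exact where Pre_ holds (rows ≠ [] inside the loop); Python raises
-- ZeroDivisionError on rows = [] with positive target, which Pre_ excludes.
-- fuel = the number of remaining loop iterations (target - len(padded)); it only
-- makes the while loop total and never cuts it short.
def padLoopA (rows : List (List (String × String))) (target : Int) :
    Nat → List (List (String × String)) → Nat → List (List (String × String))
  | 0, padded, _ => padded
  | fuel + 1, padded, idx =>
    if (padded.length : Int) < target then
      padLoopA rows target fuel (padded ++ [rows.getD (idx % rows.length) []]) (idx + 1)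
    else padded

def build_padded_rows (rows : List (List (String × String))) (target_count : Int) : List (List (String × String)) :=
  if (rows.length : Int) ≥ target_count then rows
  else padLoopA rows target_count target_count.toNat [] 0

-- ===== PORT B =====
-- q full copies of rows, then the first r rows; divmod? is none exactly where
-- Python's divmod raises ZeroDivisionError (rows = [], excluded by Pre_).
def build_padded_rows_alt (rows : List (List (String × String))) (target_count : Int) : List (List (String × String)) :=
  if (rows.length : Int) ≥ target_count then rows
  else
    match PySem.Int.divmod? target_count rows.length with
    | none => []
    | some (q, r) => (List.replicate q.toNat rows).flatten ++ rows.take r.toNat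

-- ===== PRECONDITION & SPEC =====
-- Pre_ excludes only rows = [] with positive target_count, where both A and B raise ZeroDivisionError.
def Pre_build_padded_rows (rows : List (List (String × String))) (target_count : Int) : Prop :=
  rows ≠ [] ∨ target_count ≤ 0
instance (rows : List (List (String × String))) (target_count : Int) : Decidable (Pre_build_padded_rows rows target_count) := by unfold Pre_build_padded_rows; infer_instance

def pvWitness_build_padded_rows : (List (List (String × String))) × Int := ([[("url", "a")]], 3)

def Spec_build_padded_rows (rows : List (List (String × String))) (target_count : Int) (out : List (List (String × String))) : Prop := out = build_padded_rows_alt rows target_count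
instance (rows : List (List (String × String))) (target_count : Int) (out : List (List (String × String))) : Decidable (Spec_build_padded_rows rows target_count out) := by unfold Spec_build_padded_rows; infer_instance

-- ===== CLAIM (what is proved, stated in full; the proofs are below) =====
def Claim_equal_build_padded_rows : Prop := ∀ (rows : List (List (String × String))) (target_count : Int), Dom_build_padded_rows rows target_count → Pre_build_padded_rows rows target_count → Spec_build_padded_rows rows target_count (build_padded_rows rows target_count)

-- ===== LEMMAS AND PROOFS =====

-- the sequence A's loop appends: k elements rows[(idx+j) % len(rows)]
def cyc (rows : List (List (String × String))) (idx k : Nat) : List (List (String × String)) :=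
  match k with
  | 0 => []
  | k + 1 => rows.getD (idx % rows.length) [] :: cyc rows (idx + 1) k

theorem padLoopA_eq (rows : List (List (String × String))) (target : Int) :
    ∀ (k : Nat) (padded : List (List (String × String))) (idx : Nat),
      (target - padded.length).toNat = k →
      padLoopA rows target k padded idx = padded ++ cyc rows idx k := by
  intro k
  induction k with
  | zero =>
      intro padded _ _
      simp [padLoopA, cyc]
  | succ k ih =>
      intro padded idx hk
      rw [padLoopA, if_pos (by omega)]
      rw [ih (padded ++ [rows.getD (idx % rows.length) []]) (idx + 1)
        (by simp only [List.length_append, List.length_cons, List.length_nil]; omega)]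
      simp [cyc]

theorem cyc_congr (rows : List (List (String × String))) :
    ∀ (k idx idx' : Nat), idx % rows.length = idx' % rows.length →
      cyc rows idx k = cyc rows idx' k := by
  intro k
  induction k with
  | zero => intro idx idx' _; rfl
  | succ k ih =>
      intro idx idx' h
      simp only [cyc, h]
      exact congrArg _ (ih (idx + 1) (idx' + 1) (by rw [Nat.add_mod idx, Nat.add_mod idx', h]))

theorem cyc_take (rows : List (List (String × String))) :
    ∀ (k idx : Nat), idx + k ≤ rows.length →
      cyc rows idx k = (rows.drop idx).take k := by
  intro k
  induction k with
  | zero => intro idx _; rfl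
  | succ k ih =>
      intro idx h
      have hlt : idx < rows.length := by omega
      simp only [cyc, Nat.mod_eq_of_lt hlt]
      rw [List.drop_eq_getElem_cons hlt, List.take_succ_cons,
        List.getD_eq_getElem rows [] hlt, ih (idx + 1) (by omega)]

theorem cyc_add (rows : List (List (String × String))) :
    ∀ (a b idx : Nat), cyc rows idx (a + b) = cyc rows idx a ++ cyc rows (idx + a) b := by
  intro a
  induction a with
  | zero => intro b idx; simp [cyc]
  | succ a ih =>
      intro b idx
      have h1 : a + 1 + b = (a + b) + 1 := by omega
      rw [h1]
      simp only [cyc]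
      rw [ih b (idx + 1)]
      simp only [List.cons_append]
      have h2 : idx + 1 + a = idx + (a + 1) := by omega
      rw [h2]

theorem cyc_blocks (rows : List (List (String × String))) :
    ∀ (q r : Nat), r < rows.length →
      cyc rows 0 (q * rows.length + r) = (List.replicate q rows).flatten ++ rows.take r := by
  intro q
  induction q with
  | zero =>
      intro r hr
      simp only [Nat.zero_mul, Nat.zero_add, List.replicate_zero, List.flatten_nil,
        List.nil_append]
      rw [cyc_take rows r 0 (by omega)]
      simp
  | succ q ih =>
      intro r hr
      have h1 : (q + 1) * rows.length + r = rows.length + (q * rows.length + r) := by ring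
      rw [h1, cyc_add rows rows.length (q * rows.length + r) 0,
        cyc_congr rows (q * rows.length + r) (0 + rows.length) 0 (by simp),
        ih r hr, cyc_take rows rows.length 0 (by omega)]
      simp [List.replicate_succ]

-- ===== VERDICT (by name: the statement is the Claim_ definition above) =====
theorem build_padded_rows_spec : Claim_equal_build_padded_rows := by
  intro rows target _ hpre
  unfold Spec_build_padded_rows build_padded_rows build_padded_rows_alt
  by_cases hge : (rows.length : Int) ≥ target
  · rw [if_pos hge, if_pos hge]
  · rw [if_neg hge, if_neg hge]
    have hne : rows ≠ [] := by
      rcases hpre with h | h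
      · exact h
      · intro hnil; apply hge; rw [hnil]; simpa using le_trans h (by norm_num)
    have hn : 0 < rows.length := List.length_pos_iff.mpr hne
    have hnz : (rows.length : Int) ≠ 0 := by exact_mod_cast hn.ne'
    have hdm : PySem.Int.divmod? target rows.length =
        some (PySem.Int.floordiv target rows.length, PySem.Int.mod target rows.length) := by
      simp only [PySem.Int.divmod?]
      rw [if_neg hnz]
      rfl
    rw [hdm]
    have ht : 0 < target := by omega
    have hq : PySem.Int.floordiv target rows.length = target / rows.length :=
      PySem.Int.floordiv_eq_ediv_of_pos (by exact_mod_cast hn)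
    have hr : PySem.Int.mod target rows.length = target % rows.length :=
      PySem.Int.mod_eq_emod_of_pos (by exact_mod_cast hn)
    have hrange : 0 ≤ target % (rows.length : Int) ∧ target % (rows.length : Int) < rows.length :=
      ⟨Int.emod_nonneg target hnz, Int.emod_lt_of_pos target (by exact_mod_cast hn)⟩
    have hqnn : 0 ≤ target / (rows.length : Int) :=
      Int.ediv_nonneg (by omega) (by exact_mod_cast hn.le)
    rw [padLoopA_eq rows target target.toNat [] 0 (by simp)]
    have hsplit : target.toNat =
        (target / (rows.length : Int)).toNat * rows.length + (target % (rows.length : Int)).toNat := by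
      have h1 := Int.ediv_add_emod target (rows.length : Int)
      have hmc := mul_comm (target / (rows.length : Int)) (rows.length : Int)
      have hcast : (↑(target.toNat) : Int) =
          ↑((target / ↑rows.length).toNat * rows.length + (target % ↑rows.length).toNat) := by
        push_cast [Int.toNat_of_nonneg hqnn, Int.toNat_of_nonneg hrange.1,
          Int.toNat_of_nonneg ht.le]
        linarith
      exact_mod_cast hcast
    rw [List.nil_append, hsplit,
      cyc_blocks rows _ _ (by omega), hq, hr]
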